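-- pv_equiv track=rewrite | github.com/davilnam/python | oop/tinh_diem_chuyen_can.py | tinhDiem
-- ===== SOURCE A (Python) =====
-- def tinhDiem(s):
--     res = 10
--     for i in s:
--         if i == 'm':
--             res -= 1
--         elif i == 'v':
--             res -= 2
--     if res <= 0:
--         return 0
--     else:
--         return res
-- ===== SOURCE B (Python) =====
-- def tinhDiem(s):
--     def pen(seg):
--         n = len(seg)
--         if n == 0:
--             return 0
--         if n == 1:
--             return {'m': 1, 'v': 2}.get(seg, 0)
--         m = n // 2
--         return pen(seg[:m]) + pen(seg[m:])
--     p = pen(s)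
--     return 0 if p >= 10 else 10 - p
-- ===== Notes on version B (the rewrite author's own statement) =====
-- stated objective: alternative
-- what changed: Replaced the left-to-right loop with a running accumulator by a divide-and-conquer recursion that splits the string in halves and sums the penalties of the halves (correct because penalty is additive over concatenation), applying the clamp once at the end.
import Mathlib
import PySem

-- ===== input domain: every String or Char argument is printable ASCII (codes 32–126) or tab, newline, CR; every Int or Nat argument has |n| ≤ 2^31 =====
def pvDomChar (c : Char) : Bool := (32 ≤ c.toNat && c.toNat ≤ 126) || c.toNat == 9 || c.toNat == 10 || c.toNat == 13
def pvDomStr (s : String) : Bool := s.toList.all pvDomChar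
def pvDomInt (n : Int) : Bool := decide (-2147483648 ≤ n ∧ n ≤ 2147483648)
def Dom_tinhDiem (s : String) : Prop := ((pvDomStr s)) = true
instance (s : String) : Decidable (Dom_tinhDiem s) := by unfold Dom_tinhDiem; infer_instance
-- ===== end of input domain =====

-- B replaces A's accumulator loop by a divide-and-conquer recursion summing per-half penalties, clamped once at the end.

-- ===== PORT A =====
def tinhDiem (s : String) : Int :=
  let res : Int := s.toList.foldl
    (fun r i => if i = 'm' then r - 1 else if i = 'v' then r - 2 else r) 10
  if res ≤ 0 then 0 else res

-- ===== PORT B =====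
-- divide-and-conquer penalty over halves of the character list (B's pen helper)
def pvPen (l : List Char) : Int :=
  if _h : l.length ≤ 1 then
    match l with
    | [] => 0
    | c :: _ => if c = 'm' then 1 else if c = 'v' then 2 else 0
  else
    pvPen (l.take (l.length / 2)) + pvPen (l.drop (l.length / 2))
termination_by l.length
decreasing_by
  · simp only [List.length_take]; omega
  · simp only [List.length_drop]; omega

def tinhDiem_alt (s : String) : Int :=
  let p := pvPen s.toList
  if p ≥ 10 then 0 else 10 - p

-- ===== PRECONDITION & SPEC =====
def Spec_tinhDiem (s : String) (out : Int) : Prop := out = tinhDiem_alt s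
instance (s : String) (out : Int) : Decidable (Spec_tinhDiem s out) := by unfold Spec_tinhDiem; infer_instance

-- ===== CLAIM =====
def Claim_equal_tinhDiem : Prop := ∀ (s : String), Dom_tinhDiem s → Spec_tinhDiem s (tinhDiem s)

-- ===== LEMMAS AND PROOFS =====

theorem pvPen_eq (l : List Char) :
    pvPen l = (l.count 'm' : Int) + 2 * (l.count 'v' : Int) := by
  induction l using pvPen.induct with
  | case1 => simp [pvPen]
  | case2 t h _ =>
    have ht : t = [] := by simpa using h
    subst ht; simp [pvPen]
  | case3 t h _ _ =>
    have ht : t = [] := by simpa using h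
    subst ht; simp [pvPen]
  | case4 c t h hm hv _ =>
    have ht : t = [] := by simpa using h
    subst ht; simp [pvPen, hm, hv]
  | case5 x h ih1 ih2 =>
    rw [pvPen]
    simp only [h, ih1, ih2]
    have hx := List.take_append_drop (x.length / 2) x
    conv_rhs => rw [← hx]
    simp only [List.count_append]
    push_cast; ring

theorem fold_eq_counts (l : List Char) (a : Int) :
    l.foldl (fun r i => if i = 'm' then r - 1 else if i = 'v' then r - 2 else r) a
      = a - (l.count 'm' : Int) - 2 * (l.count 'v' : Int) := by
  induction l generalizing a with
  | nil => simp
  | cons x t ih =>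
    by_cases hm : x = 'm'
    · subst hm; simp [List.foldl_cons, ih]; ring
    · by_cases hv : x = 'v'
      · subst hv; simp [List.foldl_cons, ih]; ring
      · simp [List.foldl_cons, hm, hv, ih]

-- ===== VERDICT =====
theorem tinhDiem_spec : Claim_equal_tinhDiem := by
  intro s _
  unfold Spec_tinhDiem tinhDiem tinhDiem_alt
  simp only [fold_eq_counts, pvPen_eq]
  omega
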